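-- pv_equiv track=rewrite | github.com/RedGl0w/AdventOfCode | 2024/15/part1.py | pushCrate
-- ===== SOURCE A (Python) =====
-- def nextFromDirection(coo, direction):
--   i,j = coo
--   match direction:
--     case '<':
--       return (i, j-1)
--     case '>':
--       return (i, j+1)
--     case '^':
--       return (i-1, j)
--     case 'v':
--       return (i+1, j)
--
-- def pushCrate(coo, direction, warehouse):
--   nextCrate = nextFromDirection(coo, direction)
--   match warehouse[nextCrate[0]][nextCrate[1]]:
--     case 'O':
--       # Try to move the crate after this one in the correct direction
--       if not pushCrate(nextCrate, direction, warehouse):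
--         return False
--     case '#':
--       return False
--   # Let's move the crate
--   warehouse[nextCrate[0]][nextCrate[1]] = 'O'
--   warehouse[coo[0]][coo[1]] = '.'
--   return True
-- ===== SOURCE B (Python) =====
-- def nextFromDirection(coo, direction):
--   i,j = coo
--   match direction:
--     case '<':
--       return (i, j-1)
--     case '>':
--       return (i, j+1)
--     case '^':
--       return (i-1, j)
--     case 'v':
--       return (i+1, j)
--
-- def pushCrate(coo, direction, warehouse):
--   di, dj = {'<': (0, -1), '>': (0, 1), '^': (-1, 0), 'v': (1, 0)}[direction]
--   i, j = coo[0] + di, coo[1] + dj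
--   # scan forward over the run of crates without writing anything
--   while warehouse[i][j] == 'O':
--     i += di
--     j += dj
--   if warehouse[i][j] == '#':
--     return False
--   warehouse[i][j] = 'O'
--   warehouse[coo[0]][coo[1]] = '.'
--   return True
-- ===== Notes on version B (the rewrite author's own statement) =====
-- stated objective: simpler
-- what changed: Replaces A's recursive push (recurse past each crate, then write on unwind) with a single iterative forward scan that walks the pointer over the run of 'O' cells, decides on the first other cell, and performs only the two net writes.
import Mathlib
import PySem

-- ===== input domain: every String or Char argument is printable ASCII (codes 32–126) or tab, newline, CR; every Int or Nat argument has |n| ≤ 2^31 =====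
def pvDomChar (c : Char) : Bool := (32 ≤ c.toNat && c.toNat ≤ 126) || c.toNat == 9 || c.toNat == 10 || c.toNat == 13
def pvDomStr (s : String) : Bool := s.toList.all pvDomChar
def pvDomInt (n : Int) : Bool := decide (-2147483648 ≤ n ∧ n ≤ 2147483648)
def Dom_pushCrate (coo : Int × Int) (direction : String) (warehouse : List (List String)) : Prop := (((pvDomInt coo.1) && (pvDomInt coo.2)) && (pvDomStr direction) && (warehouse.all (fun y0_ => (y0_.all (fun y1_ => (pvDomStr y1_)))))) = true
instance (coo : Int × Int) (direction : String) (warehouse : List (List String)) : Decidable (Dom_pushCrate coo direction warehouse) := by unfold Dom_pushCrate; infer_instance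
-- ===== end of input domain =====

-- B replaces A's recursion with a single forward scan loop (pointer walks over the run of
-- crates, then one decision); return-value equivalence is proved (both also make the same
-- net mutation of `warehouse` in Python, but only the return value is claimed here).


-- ===== PORT A =====
-- warehouse[p.1][p.2] with Python indexing (negative from the end; none = IndexError)
def cellAt (warehouse : List (List String)) (p : Int × Int) : Option String :=
  (PySem.List.pyGet? warehouse p.1).bind (fun row => PySem.List.pyGet? row p.2)

def nextFromDirection (coo : Int × Int) (direction : String) : Option (Int × Int) :=
  if direction = "<" then some (coo.1, coo.2 - 1)
  else if direction = ">" then some (coo.1, coo.2 + 1)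
  else if direction = "^" then some (coo.1 - 1, coo.2)
  else if direction = "v" then some (coo.1 + 1, coo.2)
  else none  -- Python: falls off the match and returns None

-- fuel bound: inside Pre_ the scan stays in Python index range, so it moves at most
-- 2*(rows + longest row) + 2 cells before hitting a non-'O' cell
def pushFuel (warehouse : List (List String)) : Nat :=
  2 * (warehouse.length + (warehouse.map List.length).foldr max 0) + 2

-- literal transliteration of A's recursion (fuel only makes it total; never exhausted inside Pre_)
def pushCrateRec (fuel : Nat) (coo : Int × Int) (direction : String) (warehouse : List (List String)) : Bool :=
  match fuel with
  | 0 => false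
  | fuel + 1 =>
    match nextFromDirection coo direction with
    | none => false  -- Python raises TypeError here (None subscript); excluded by Pre_
    | some nextCrate =>
      match cellAt warehouse nextCrate with
      | none => false  -- Python raises IndexError here; excluded by Pre_
      | some c =>
        if c = "O" then
          if !pushCrateRec fuel nextCrate direction warehouse then false
          else true  -- the two writes are mutation only; return True
        else if c = "#" then false
        else true  -- default: move into the empty cell

def pushCrate (coo : Int × Int) (direction : String) (warehouse : List (List String)) : Bool :=
  pushCrateRec (pushFuel warehouse) coo direction warehouse

-- ===== PORT B =====
-- the dict literal {'<':(0,-1), '>':(0,1), '^':(-1,0), 'v':(1,0)} looked up at direction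
def deltaOf (direction : String) : Option (Int × Int) :=
  PySem.Dict.get?
    (PySem.Dict.ofList [("<", ((0 : Int), (-1 : Int))), (">", (0, 1)), ("^", (-1, 0)), ("v", (1, 0))])
    direction

-- B's while loop: advance while the cell holds 'O'; return the first other read
def scanLoop (fuel : Nat) (i j di dj : Int) (warehouse : List (List String)) : Option String :=
  match fuel with
  | 0 => none
  | fuel + 1 =>
    match cellAt warehouse (i, j) with
    | none => none  -- Python raises IndexError here; excluded by Pre_
    | some c => if c = "O" then scanLoop fuel (i + di) (j + dj) di dj warehouse else some c

def pushCrate_alt (coo : Int × Int) (direction : String) (warehouse : List (List String)) : Bool :=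
  match deltaOf direction with
  | none => false  -- Python raises KeyError here; excluded by Pre_
  | some (di, dj) =>
    match scanLoop (pushFuel warehouse) (coo.1 + di) (coo.2 + dj) di dj warehouse with
    | none => false
    | some c => if c = "#" then false else true  -- writes are mutation only

-- ===== PRECONDITION & SPEC =====
-- Pre_ excludes exactly the inputs where Python A raises: an invalid direction (TypeError) or a
-- scan that walks out of Python index range before reaching a non-'O' cell (IndexError).
def Pre_pushCrate (coo : Int × Int) (direction : String) (warehouse : List (List String)) : Prop :=
  direction ∈ ["<", ">", "^", "v"] ∧
  ∃ k < pushFuel warehouse + 1, 1 ≤ k ∧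
    (∀ m < k, 1 ≤ m →
      cellAt warehouse (coo.1 + m * ((deltaOf direction).getD (0, 0)).1,
                        coo.2 + m * ((deltaOf direction).getD (0, 0)).2) = some "O") ∧
    (∃ c, cellAt warehouse (coo.1 + k * ((deltaOf direction).getD (0, 0)).1,
                            coo.2 + k * ((deltaOf direction).getD (0, 0)).2) = some c ∧ c ≠ "O")
instance (coo : Int × Int) (direction : String) (warehouse : List (List String)) : Decidable (Pre_pushCrate coo direction warehouse) := by unfold Pre_pushCrate; infer_instance

def pvWitness_pushCrate : (Int × Int) × String × List (List String) :=
  ((0, 0), ">", [[".", "O", "."]])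

def Spec_pushCrate (coo : Int × Int) (direction : String) (warehouse : List (List String)) (out : Bool) : Prop := out = pushCrate_alt coo direction warehouse
instance (coo : Int × Int) (direction : String) (warehouse : List (List String)) (out : Bool) : Decidable (Spec_pushCrate coo direction warehouse out) := by unfold Spec_pushCrate; infer_instance

-- ===== CLAIM (what is proved, stated in full; the proofs are below) =====
def Claim_equal_pushCrate : Prop := ∀ (coo : Int × Int) (direction : String) (warehouse : List (List String)), Dom_pushCrate coo direction warehouse → Pre_pushCrate coo direction warehouse → Spec_pushCrate coo direction warehouse (pushCrate coo direction warehouse)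

-- ===== LEMMAS AND PROOFS =====
-- the tail of B's port, as a function of the scan result
def finish (r : Option String) : Bool :=
  match r with
  | none => false
  | some c => if c = "#" then false else true

theorem rec_eq_scan (di dj : Int) (direction : String) (warehouse : List (List String))
    (h : ∀ p : Int × Int, nextFromDirection p direction = some (p.1 + di, p.2 + dj)) :
    ∀ (fuel : Nat) (coo : Int × Int),
      pushCrateRec fuel coo direction warehouse
        = finish (scanLoop fuel (coo.1 + di) (coo.2 + dj) di dj warehouse) := by
  intro fuel
  induction fuel with
  | zero => intro coo; simp [pushCrateRec, scanLoop, finish]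
  | succ n ih =>
    intro coo
    rw [pushCrateRec, h coo, scanLoop]
    cases hc : cellAt warehouse (coo.1 + di, coo.2 + dj) with
    | none => simp only [hc]; rfl
    | some c =>
      simp only [hc]
      by_cases hO : c = "O"
      · subst hO
        rw [ih (coo.1 + di, coo.2 + dj)]
        cases hb : finish (scanLoop n (coo.1 + di + di) (coo.2 + dj + dj) di dj warehouse) <;>
          simp [hb]
      · simp [hO, finish]

theorem rec_none (coo : Int × Int) (direction : String) (warehouse : List (List String))
    (h : nextFromDirection coo direction = none) :
    ∀ fuel, pushCrateRec fuel coo direction warehouse = false := by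
  intro fuel
  cases fuel with
  | zero => rfl
  | succ n => rw [pushCrateRec, h]

-- ===== VERDICT (by name: the statement is the Claim_ definition above) =====
theorem pushCrate_spec : Claim_equal_pushCrate := by
  intro coo direction warehouse _ _
  show pushCrate coo direction warehouse = pushCrate_alt coo direction warehouse
  by_cases h1 : direction = "<"
  · subst h1
    rw [pushCrate, rec_eq_scan 0 (-1) "<" warehouse (fun p => by simp [nextFromDirection]; omega)]
    simp only [pushCrate_alt, show deltaOf "<" = some (0, -1) from by decide]
    rfl
  by_cases h2 : direction = ">"
  · subst h2
    rw [pushCrate, rec_eq_scan 0 1 ">" warehouse (fun p => by simp [nextFromDirection])]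
    simp only [pushCrate_alt, show deltaOf ">" = some (0, 1) from by decide]
    rfl
  by_cases h3 : direction = "^"
  · subst h3
    rw [pushCrate, rec_eq_scan (-1) 0 "^" warehouse (fun p => by simp [nextFromDirection]; omega)]
    simp only [pushCrate_alt, show deltaOf "^" = some (-1, 0) from by decide]
    rfl
  by_cases h4 : direction = "v"
  · subst h4
    rw [pushCrate, rec_eq_scan 1 0 "v" warehouse (fun p => by simp [nextFromDirection])]
    simp only [pushCrate_alt, show deltaOf "v" = some (1, 0) from by decide]
    rfl
  · rw [pushCrate, rec_none coo direction warehouse (by simp [nextFromDirection, h1, h2, h3, h4])]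
    have h1' : "<" ≠ direction := Ne.symm h1
    have h2' : ">" ≠ direction := Ne.symm h2
    have h3' : "^" ≠ direction := Ne.symm h3
    have h4' : "v" ≠ direction := Ne.symm h4
    have hofl : PySem.Dict.ofList [("<", ((0 : Int), (-1 : Int))), (">", (0, 1)), ("^", (-1, 0)), ("v", (1, 0))]
        = PySem.Dict.mk [("<", ((0 : Int), (-1 : Int))), (">", (0, 1)), ("^", (-1, 0)), ("v", (1, 0))] := by
      decide
    have hd : deltaOf direction = none := by
      simp [deltaOf, hofl, PySem.Dict.get?, h1', h2', h3', h4']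
    rw [pushCrate_alt, hd]
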